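-- pv_equiv track=rewrite | github.com/twobombs/thereminq-examples | benchmarks/ising/pyqrackising/LABS/labs-energy.py | calculate_labs_energy
-- ===== SOURCE A (Python) =====
-- def calculate_labs_energy(spins_pm1):
--     """
--     Calculates the true LABS energy E = sum(C_k^2) as defined in the paper (Eq. 1).
--
--     Parameters
--     ----------
--     spins_pm1 : list[int]
--         The binary sequence as {-1, 1} spins.
--
--     Returns
--     -------
--     int
--         The total LABS energy.
--     """
--     N = len(spins_pm1)
--     total_energy = 0
--     # k is the autocorrelation lag
--     for k in range(1, N):
--         Ck = 0
--         # i is the position in the sequence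
--         for i in range(N - k):
--             Ck += spins_pm1[i] * spins_pm1[i+k]
--         total_energy += Ck**2
--     return total_energy
-- ===== SOURCE B (Python) =====
-- def calculate_labs_energy(spins_pm1):
--     """LABS energy E = sum(C_k^2), by structural right-to-left recursion:
--     the autocorrelation list of x::suffix is x*suffix zipped onto the
--     autocorrelation list of the suffix (padded with one 0)."""
--     corr = []   # [C_1, ..., C_m] autocorrelations of the suffix processed so far
--     suff = []   # that suffix, in original order
--     for x in reversed(spins_pm1):
--         corr = [x * y + c for y, c in zip(suff, corr + [0])]
--         suff = [x] + suff
--     return sum(c * c for c in corr)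
-- ===== Notes on version B (the rewrite author's own statement) =====
-- stated objective: alternative
-- what changed: Replaces A's per-lag nested index loops with a single right-to-left structural pass that maintains the list of all autocorrelations of the processed suffix (zip-accumulate), then sums the squares.
import Mathlib
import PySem

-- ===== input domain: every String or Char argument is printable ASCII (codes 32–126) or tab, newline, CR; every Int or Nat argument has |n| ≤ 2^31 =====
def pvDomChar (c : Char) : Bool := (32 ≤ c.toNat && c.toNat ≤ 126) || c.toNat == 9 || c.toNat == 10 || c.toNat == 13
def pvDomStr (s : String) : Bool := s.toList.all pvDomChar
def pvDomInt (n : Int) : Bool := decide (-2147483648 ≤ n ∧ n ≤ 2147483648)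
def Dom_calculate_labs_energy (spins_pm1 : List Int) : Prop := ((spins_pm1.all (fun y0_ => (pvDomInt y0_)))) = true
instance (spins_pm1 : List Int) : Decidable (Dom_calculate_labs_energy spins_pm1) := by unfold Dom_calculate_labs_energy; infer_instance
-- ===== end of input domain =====

-- B replaces A's per-lag nested scans by a single right-to-left structural pass that
-- maintains the autocorrelation list of the processed suffix (objective: alternative).


-- ===== PORT A =====
def calculate_labs_energy (spins_pm1 : List Int) : Int :=
  let N : Int := spins_pm1.length
  (PySem.List.pyRange 1 N 1).foldl
    (fun total_energy k =>
      let Ck : Int := (PySem.List.pyRange 0 (N - k) 1).foldl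
        (fun Ck i =>
          Ck + PySem.List.pyGetD spins_pm1 i 0 * PySem.List.pyGetD spins_pm1 (i + k) 0) 0
      total_energy + Ck ^ 2) 0

-- ===== PORT B =====
def calculate_labs_energy_alt (spins_pm1 : List Int) : Int :=
  let st : List Int × List Int := spins_pm1.reverse.foldl
    (fun (st : List Int × List Int) x =>
      (List.zipWith (fun y c => x * y + c) st.2 (st.1 ++ [0]), x :: st.2))
    ([], [])
  st.1.foldl (fun acc c => acc + c * c) 0

-- ===== PRECONDITION & SPEC =====
def Spec_calculate_labs_energy (spins_pm1 : List Int) (out : Int) : Prop := out = calculate_labs_energy_alt spins_pm1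
instance (spins_pm1 : List Int) (out : Int) : Decidable (Spec_calculate_labs_energy spins_pm1 out) := by unfold Spec_calculate_labs_energy; infer_instance

-- ===== CLAIM (what is proved, stated in full; the proofs are below) =====
def Claim_equal_calculate_labs_energy : Prop := ∀ (spins_pm1 : List Int), Dom_calculate_labs_energy spins_pm1 → Spec_calculate_labs_energy spins_pm1 (calculate_labs_energy spins_pm1)

-- ===== LEMMAS AND PROOFS =====

/-- The autocorrelation list [C_1, …, C_{len-1}] computed the way B computes it. -/
def corrs : List Int → List Int
  | [] => []
  | x :: t => List.zipWith (fun y c => x * y + c) t (corrs t ++ [0])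

theorem corrs_length (s : List Int) : (corrs s).length = s.length - 1 := by
  induction s with
  | nil => simp [corrs]
  | cons x t ih =>
      cases t with
      | nil => simp [corrs]
      | cons y u => simp [corrs] at ih ⊢; omega

/-- B's loop state after consuming the reversed list is (corrs s, s). -/
theorem alt_state (s : List Int) :
    s.reverse.foldl
      (fun (st : List Int × List Int) x =>
        (List.zipWith (fun y c => x * y + c) st.2 (st.1 ++ [0]), x :: st.2))
      ([], []) = (corrs s, s) := by
  rw [List.foldl_reverse]
  induction s with
  | nil => rfl
  | cons x t ih => simp [List.foldr, ih, corrs]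

/-- Elementwise characterisation of `corrs`. -/
theorem getD_append_zero (l : List Int) (m : Nat) : (l ++ [0]).getD m 0 = l.getD m 0 := by
  induction l generalizing m with
  | nil => cases m <;> simp
  | cons a l ih =>
      cases m with
      | zero => simp
      | succ n => simp only [List.cons_append, List.getD_cons_succ]; exact ih n

theorem corrs_getD (s : List Int) (m : Nat) :
    (corrs s).getD m 0 =
      ∑ i ∈ Finset.range (s.length - (m + 1)), s.getD i 0 * s.getD (i + (m + 1)) 0 := by
  induction s generalizing m with
  | nil => simp [corrs]
  | cons x t ih =>
      by_cases hm : m < t.length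
      · have hlen : (corrs t).length = t.length - 1 := corrs_length t
        have hzip : (List.zipWith (fun y c => x * y + c) t (corrs t ++ [0])).getD m 0
            = x * t.getD m 0 + (corrs t ++ [0]).getD m 0 := by
          have hm' : m < (List.zipWith (fun y c => x * y + c) t (corrs t ++ [0])).length := by
            rw [List.length_zipWith]; simp [hlen]; omega
          rw [List.getD_eq_getElem _ _ hm', List.getElem_zipWith]
          have hmt : m < t.length := hm
          have hmc : m < (corrs t ++ [0]).length := by simp [hlen]; omega
          rw [List.getD_eq_getElem _ _ hmt, List.getD_eq_getElem _ _ hmc]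
        have hn : (x :: t).length - (m + 1) = (t.length - (m + 1)) + 1 := by
          simp; omega
        have hsum : ∑ i ∈ Finset.range ((x :: t).length - (m + 1)),
              (x :: t).getD i 0 * (x :: t).getD (i + (m + 1)) 0
            = x * t.getD m 0 +
              ∑ i ∈ Finset.range (t.length - (m + 1)), t.getD i 0 * t.getD (i + (m + 1)) 0 := by
          rw [hn, Finset.sum_range_succ']
          have h0 : (x :: t).getD 0 0 * (x :: t).getD (0 + (m + 1)) 0 = x * t.getD m 0 := by
            simp
          have h1 : ∀ i : ℕ, (x :: t).getD (i + 1) 0 * (x :: t).getD (i + 1 + (m + 1)) 0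
              = t.getD i 0 * t.getD (i + (m + 1)) 0 := by
            intro i
            have hi : i + 1 + (m + 1) = (i + (m + 1)) + 1 := by omega
            rw [hi]
            simp
          rw [h0, Finset.sum_congr rfl (fun i _ => h1 i)]
          ring
        rw [show corrs (x :: t) = List.zipWith (fun y c => x * y + c) t (corrs t ++ [0]) from rfl]
        rw [hzip, getD_append_zero, hsum, ih]
      · have h1 : (corrs (x :: t)).getD m 0 = 0 := by
          apply List.getD_eq_default
          rw [corrs_length]; simp; omega
        have h2 : (x :: t).length - (m + 1) = 0 := by simp; omega
        rw [h1, h2]; simp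

/-- Sum of squares of a list as a Finset sum over positions. -/
theorem foldl_sq (l : List Int) (a : Int) :
    l.foldl (fun acc c => acc + c * c) a
      = a + ∑ m ∈ Finset.range l.length, (l.getD m 0) * (l.getD m 0) := by
  induction l generalizing a with
  | nil => simp
  | cons c t ih =>
      rw [List.foldl_cons, ih]
      rw [List.length_cons, Finset.sum_range_succ']
      simp only [List.getD_cons_succ, List.getD_cons_zero]
      ring

theorem foldl_range_add (n : Nat) (f : Nat → Int) (a : Int) :
    (List.range n).foldl (fun t k => t + f k) a = a + ∑ k ∈ Finset.range n, f k := by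
  induction n generalizing a with
  | zero => simp
  | succ n ihn =>
      rw [List.range_succ, List.foldl_append, ihn, Finset.sum_range_succ]
      simp; ring

/-- A's inner loop is the lag-(k+1) autocorrelation. -/
theorem innerA (s : List Int) (k : Nat) :
    (PySem.List.pyRange 0 ((s.length : Int) - ((k : Int) + 1)) 1).foldl
        (fun Ck i =>
          Ck + PySem.List.pyGetD s i 0 * PySem.List.pyGetD s (i + ((k : Int) + 1)) 0) 0
      = ∑ i ∈ Finset.range (s.length - (k + 1)), s.getD i 0 * s.getD (i + (k + 1)) 0 := by
  have hM : (s.length : Int) - ((k : Int) + 1) = ((s.length - (k + 1) : Nat) : Int) ∨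
      (s.length : Int) - ((k : Int) + 1) ≤ 0 := by omega
  rcases hM with hM | hM
  · rw [hM, PySem.List.pyRange_zero_nat]
    induction (s.length - (k + 1) : Nat) with
    | zero => simp
    | succ n ihn =>
        rw [List.range_succ, List.map_append, List.foldl_append, ihn, Finset.sum_range_succ]
        simp only [List.map_cons, List.map_nil, List.foldl_cons, List.foldl_nil]
        have hg : PySem.List.pyGetD s ((n : Int)) 0 * PySem.List.pyGetD s ((n : Int) + ((k : Int) + 1)) 0
            = s.getD n 0 * s.getD (n + (k + 1)) 0 := by
          have hc : ((n : Int) + ((k : Int) + 1)) = ((n + (k + 1) : Nat) : Int) := by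
            push_cast; ring
          rw [hc, PySem.List.pyGetD_natCast, PySem.List.pyGetD_natCast]
        rw [hg]
  · rw [PySem.List.pyRange_one_eq_nil (by omega)]
    have h0 : s.length - (k + 1) = 0 := by omega
    rw [h0]; simp

-- ===== VERDICT (by name: the statement is the Claim_ definition above) =====
theorem calculate_labs_energy_spec : Claim_equal_calculate_labs_energy := by
  intro s _
  show calculate_labs_energy s = calculate_labs_energy_alt s
  simp only [calculate_labs_energy, calculate_labs_energy_alt, alt_state]
  rw [foldl_sq, corrs_length]
  rw [PySem.List.pyRange_one, List.foldl_map]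
  have hn : (((s.length : Int)) - 1).toNat = s.length - 1 := by omega
  rw [hn, foldl_range_add]
  congr 1
  apply Finset.sum_congr rfl
  intro k hk
  have h1 : (1 : Int) + (k : Int) = (k : Int) + 1 := by ring
  rw [h1, innerA s k, corrs_getD]
  ring
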